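-- pv_equiv track=rewrite | github.com/JacoboMoral/C | Practica 2/Exercici 1/funcions_cos_finit.py | GF_product_p
-- ===== SOURCE A (Python) =====
-- def GF_product_p(a, b):
--     r = 0
--     raux = 0
--     aaux = 0
--     baux = 0
--     xor = 0
--     for i in range(8):
--         if b & 1 == 1:
--             raux = r & 255
--             aaux = a & 255
--             xor = raux ^ aaux
--             #print ("1raux: " + str(raux))
--             #print ("1aaux: " + str(aaux))
--             #print ("1xor: " + str(xor))
--             r = xor
--         msb = a & 128   #128 = 0x80
--         aaux = a & 255
--         aaux = aaux << 1
--         #print ("1msb: " + str(msb))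
--         #print ("2aaux: " + str(aaux))
--         a = aaux
--         #print ("1a: " + str(a))
--         if msb == 128:
--             xor = aaux ^ 27 #27 = 0x1B
--             a = xor
--             #print ("2xor: " + str(xor))
--             #print ("2a: " + str(a))
--         baux = b & 255
--         #print ("1baux: " + str(baux))
--         baux = baux >> 1
--         #print ("2baux: " + str(baux))
--         b = baux
--         #print ("1b: " + str(b))
--     return r
-- ===== SOURCE B (Python) =====
-- def GF_product_p(a, b):
--     a8 = a & 255
--     b8 = b & 255
--     # pass 1: carry-less (polynomial) product, up to 16 bits
--     p = 0
--     for i in range(8):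
--         if (b8 >> i) & 1 == 1:
--             p ^= a8 << i
--     # pass 2: reduce modulo x^8 + x^4 + x^3 + x + 1 (0x11B)
--     for bit in range(15, 7, -1):
--         if (p >> bit) & 1 == 1:
--             p ^= 0x11B << (bit - 8)
--     return p
-- ===== Notes on version B (the rewrite author's own statement) =====
-- stated objective: alternative
-- what changed: A interleaves multiplication and reduction in one Russian-peasant loop (conditional xor into r, then xtime: shift a and conditionally xor 0x1B, shift b, each iteration); B instead masks the inputs to bytes once, builds the full 16-bit carry-less product in one pass, and then reduces bits 15..8 modulo the AES polynomial 0x11B in a second pass.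
import Mathlib
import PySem

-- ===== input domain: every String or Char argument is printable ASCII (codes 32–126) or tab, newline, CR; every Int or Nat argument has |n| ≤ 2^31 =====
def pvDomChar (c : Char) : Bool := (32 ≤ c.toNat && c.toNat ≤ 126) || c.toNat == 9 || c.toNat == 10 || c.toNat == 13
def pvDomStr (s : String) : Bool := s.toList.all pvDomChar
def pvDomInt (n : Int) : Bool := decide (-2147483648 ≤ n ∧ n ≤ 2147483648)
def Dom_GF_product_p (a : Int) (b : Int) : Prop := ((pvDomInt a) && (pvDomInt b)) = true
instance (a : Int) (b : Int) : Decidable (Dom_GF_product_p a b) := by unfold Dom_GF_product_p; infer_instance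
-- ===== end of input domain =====

-- B replaces A's interleaved shift-and-reduce (xtime) loop by two separate passes —
-- carry-less multiplication into a 16-bit product, then reduction modulo 0x11B — same results.

-- ===== PORT A =====
-- body of A's `for i in range(8)` loop over the state (r, a, b)
def gfStepA (s : Int × Int × Int) : Int × Int × Int :=
  let r := s.1
  let a := s.2.1
  let b := s.2.2
  let r := if PySem.Int.band b 1 = 1 then
      PySem.Int.bxor (PySem.Int.band r 255) (PySem.Int.band a 255) else r
  let msb := PySem.Int.band a 128
  let aaux := (PySem.Int.band a 255) <<< (1 : Nat)
  let a := if msb = 128 then PySem.Int.bxor aaux 27 else aaux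
  let b := (PySem.Int.band b 255) >>> (1 : Nat)
  (r, a, b)

def GF_product_p (a : Int) (b : Int) : Int :=
  ((List.range 8).foldl (fun s _ => gfStepA s) (0, a, b)).1

-- ===== PORT B =====
-- body of B's `for bit in range(15, 7, -1)` reduction loop
def gfRedStep (p : Int) (bit : Nat) : Int :=
  if PySem.Int.band (p >>> bit) 1 = 1 then PySem.Int.bxor p ((283 : Int) <<< (bit - 8)) else p

def GF_product_p_alt (a : Int) (b : Int) : Int :=
  let a8 := PySem.Int.band a 255
  let b8 := PySem.Int.band b 255
  let p := (List.range 8).foldl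
    (fun (p : Int) (i : Nat) => if PySem.Int.band (b8 >>> i) 1 = 1 then PySem.Int.bxor p (a8 <<< i) else p) 0
  ((List.range' 8 8).reverse).foldl gfRedStep p

-- ===== PRECONDITION & SPEC =====
def Spec_GF_product_p (a : Int) (b : Int) (out : Int) : Prop := out = GF_product_p_alt a b
instance (a : Int) (b : Int) (out : Int) : Decidable (Spec_GF_product_p a b out) := by unfold Spec_GF_product_p; infer_instance

-- ===== CLAIM (what is proved, stated in full; the proofs are below) =====
def Claim_equal_GF_product_p : Prop := ∀ (a : Int) (b : Int), Dom_GF_product_p a b → Spec_GF_product_p a b (GF_product_p a b)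

-- ===== LEMMAS AND PROOFS =====

-- Nat models of the two loop bodies
def xtN (a : Nat) : Nat :=
  let aa := (a &&& 255) <<< 1
  if a &&& 128 = 128 then aa ^^^ 27 else aa

def stepN (s : Nat × Nat × Nat) : Nat × Nat × Nat :=
  (if s.2.2 &&& 1 = 1 then (s.1 &&& 255) ^^^ (s.2.1 &&& 255) else s.1,
   xtN s.2.1,
   (s.2.2 &&& 255) >>> 1)

def redStepN (p : Nat) (bit : Nat) : Nat :=
  if (p >>> bit) &&& 1 = 1 then p ^^^ (283 <<< (bit - 8)) else p

def redN (p : Nat) : Nat := ((List.range' 8 8).reverse).foldl redStepN p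

def mulFoldN (n m : Nat) : Nat :=
  (List.range 8).foldl (fun p i => if (m >>> i) &&& 1 = 1 then p ^^^ (n <<< i) else p) 0

def natAN (n m : Nat) : Nat := ((List.range 8).foldl (fun s _ => stepN s) (0, n, m)).1

-- cast helpers
theorem castShiftL (x k : Nat) : ((x : Int) <<< k) = ((x <<< k : Nat) : Int) := by exact_mod_cast rfl
theorem castShiftR (x k : Nat) : ((x : Int) >>> k) = ((x >>> k : Nat) : Int) := by exact_mod_cast rfl

theorem band_nc1 (b : Nat) : PySem.Int.band (b : Int) 1 = ((b &&& 1 : Nat) : Int) := by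
  exact_mod_cast PySem.Int.band_natCast b 1
theorem band_nc255 (b : Nat) : PySem.Int.band (b : Int) 255 = ((b &&& 255 : Nat) : Int) := by
  exact_mod_cast PySem.Int.band_natCast b 255
theorem band_nc128 (b : Nat) : PySem.Int.band (b : Int) 128 = ((b &&& 128 : Nat) : Int) := by
  exact_mod_cast PySem.Int.band_natCast b 128
theorem bxor_nc (m n : Nat) : PySem.Int.bxor (m : Int) (n : Int) = ((m ^^^ n : Nat) : Int) := by
  exact_mod_cast PySem.Int.bxor_natCast m n
theorem bxor_nc27 (m : Nat) : PySem.Int.bxor (m : Int) 27 = ((m ^^^ 27 : Nat) : Int) := by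
  exact_mod_cast PySem.Int.bxor_natCast m 27

-- Nat masking facts
theorem nat_and_255 (k : Nat) : k &&& 255 = k % 256 := Nat.and_two_pow_sub_one_eq_mod k 8
theorem nat_and_1 (k : Nat) : k &&& 1 = k % 2 := Nat.and_two_pow_sub_one_eq_mod k 1
theorem nat_and_128 (k : Nat) : k &&& 128 = k / 128 % 2 * 128 := by
  have h := Nat.and_two_pow k 7
  have ht : k.testBit 7 = decide (k / 2 ^ 7 % 2 = 1) := Nat.testBit_eq_decide_div_mod_eq
  rcases Nat.mod_two_eq_zero_or_one (k / 128) with h0 | h0 <;>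
    · rw [show (128 : Nat) = 2 ^ 7 from rfl] at h0 ⊢
      rw [h, ht, h0]
      simp

-- `band a c` depends only on a % 256 for byte masks c
theorem band255_int (a : Int) : PySem.Int.band a 255 = (((a % 256).toNat : Nat) : Int) := by
  by_cases h : 0 ≤ a
  · rw [PySem.Int.band_of_nonneg h (by norm_num)]
    have : (255 : Int).toNat = 255 := rfl
    rw [this, nat_and_255]
    omega
  · simp only [PySem.Int.band, h, if_false, if_pos (by norm_num : (0:Int) ≤ 255)]
    have : (255 : Int).toNat = 255 := rfl
    rw [this, Nat.and_comm, nat_and_255]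
    omega

theorem band1_int (a : Int) : PySem.Int.band a 1 = (((a % 256).toNat &&& 1 : Nat) : Int) := by
  rw [PySem.Int.band_one, PySem.Int.mod_eq_emod_of_pos (by norm_num), nat_and_1]
  omega

theorem band128_int (a : Int) : PySem.Int.band a 128 = (((a % 256).toNat &&& 128 : Nat) : Int) := by
  by_cases h : 0 ≤ a
  · rw [PySem.Int.band_of_nonneg h (by norm_num)]
    have : (128 : Int).toNat = 128 := rfl
    rw [this, nat_and_128, nat_and_128]
    omega
  · simp only [PySem.Int.band, h, if_false, if_pos (by norm_num : (0:Int) ≤ 128)]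
    have : (128 : Int).toNat = 128 := rfl
    rw [this, Nat.and_comm, nat_and_128, nat_and_128]
    omega

-- the masked versions are idempotent on bytes
theorem byte_mod (n : Nat) (h : n < 256) : (((n : Int) % 256).toNat) = n := by omega

theorem band_mask_inv (a : Int) :
    PySem.Int.band a 255 = PySem.Int.band (((a % 256).toNat : Nat) : Int) 255 ∧
    PySem.Int.band a 128 = PySem.Int.band (((a % 256).toNat : Nat) : Int) 128 ∧
    PySem.Int.band a 1 = PySem.Int.band (((a % 256).toNat : Nat) : Int) 1 := by
  refine ⟨?_, ?_, ?_⟩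
  · rw [band255_int a, band255_int, byte_mod _ (by omega)]
  · rw [band128_int a, band128_int, byte_mod _ (by omega)]
  · rw [band1_int a, band1_int, byte_mod _ (by omega)]

-- step 1 of A only sees a % 256 and b % 256
theorem step1_mask (a b : Int) :
    gfStepA (0, a, b) = gfStepA (0, (((a % 256).toNat : Nat) : Int), (((b % 256).toNat : Nat) : Int)) := by
  obtain ⟨ha255, ha128, -⟩ := band_mask_inv a
  obtain ⟨hb255, -, hb1⟩ := band_mask_inv b
  simp only [gfStepA, ha255, ha128, hb255, hb1]

-- A's Int fold equals the Nat model fold on cast inputs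
theorem stepA_cast (s : Nat × Nat × Nat) :
    gfStepA ((s.1 : Int), (s.2.1 : Int), (s.2.2 : Int)) =
      (((stepN s).1 : Int), ((stepN s).2.1 : Int), ((stepN s).2.2 : Int)) := by
  obtain ⟨r, a, b⟩ := s
  simp only [gfStepA, stepN, xtN, band_nc1, band_nc255, band_nc128, bxor_nc, bxor_nc27,
    castShiftL, castShiftR]
  norm_cast

theorem foldA_cast (l : List Nat) (s : Nat × Nat × Nat) :
    l.foldl (fun s _ => gfStepA s) ((s.1 : Int), (s.2.1 : Int), (s.2.2 : Int)) =
      (((l.foldl (fun s _ => stepN s) s).1 : Int),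
       ((l.foldl (fun s _ => stepN s) s).2.1 : Int),
       ((l.foldl (fun s _ => stepN s) s).2.2 : Int)) := by
  induction l generalizing s with
  | nil => rfl
  | cons x xs ih =>
      simp only [List.foldl_cons, stepA_cast, ih]

theorem A_cast (n m : Nat) : GF_product_p (n : Int) (m : Int) = ((natAN n m : Nat) : Int) := by
  unfold GF_product_p natAN
  have h := foldA_cast (List.range 8) ((0, n, m) : Nat × Nat × Nat)
  simp only [Nat.cast_zero] at h
  rw [h]

theorem A_mod (a b : Int) :
    GF_product_p a b = GF_product_p (((a % 256).toNat : Nat) : Int) (((b % 256).toNat : Nat) : Int) := by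
  have hr : List.range 8 = 0 :: [1, 2, 3, 4, 5, 6, 7] := rfl
  unfold GF_product_p
  rw [hr]
  simp only [List.foldl_cons]
  rw [step1_mask]

-- B's Int computation equals the Nat model on the masked inputs
theorem foldMul_cast (na nb : Nat) (l : List Nat) (p : Nat) :
    l.foldl (fun (p : Int) (i : Nat) => if PySem.Int.band ((nb : Int) >>> i) 1 = 1 then PySem.Int.bxor p ((na : Int) <<< i) else p) ((p : Nat) : Int) =
      ((l.foldl (fun (p : Nat) (i : Nat) => if (nb >>> i) &&& 1 = 1 then p ^^^ (na <<< i) else p) p : Nat) : Int) := by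
  induction l generalizing p with
  | nil => rfl
  | cons x xs ih =>
      simp only [List.foldl_cons]
      rw [castShiftR, band_nc1, castShiftL, bxor_nc]
      by_cases h : (nb >>> x) &&& 1 = 1
      · rw [if_pos (by exact_mod_cast h), if_pos h]
        exact ih _
      · rw [if_neg (by exact_mod_cast h), if_neg h]
        exact ih _

theorem foldRed_cast (l : List Nat) (p : Nat) :
    l.foldl gfRedStep ((p : Nat) : Int) = ((l.foldl redStepN p : Nat) : Int) := by
  induction l generalizing p with
  | nil => rfl
  | cons x xs ih =>
      simp only [List.foldl_cons, gfRedStep, redStepN]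
      rw [castShiftR, band_nc1]
      have h283 : ((283 : Int) <<< (x - 8)) = (((283 <<< (x - 8) : Nat)) : Int) := by
        exact_mod_cast castShiftL 283 (x - 8)
      rw [h283, bxor_nc]
      by_cases h : (p >>> x) &&& 1 = 1
      · rw [if_pos (by exact_mod_cast h), if_pos h]
        exact ih _
      · rw [if_neg (by exact_mod_cast h), if_neg h]
        exact ih _

theorem B_total (a b : Int) :
    GF_product_p_alt a b = ((redN (mulFoldN (a % 256).toNat (b % 256).toNat) : Nat) : Int) := by
  simp only [GF_product_p_alt, redN, mulFoldN]
  rw [band255_int a, band255_int b]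
  rw [show ((0 : Int)) = (((0 : Nat)) : Int) from rfl, foldMul_cast, foldRed_cast]

-- ===== Nat-level equivalence =====

-- characterisation of A's loop: r accumulates the bytes of the iterated xtime of a,
-- selected by the bits of b
theorem stepN_iter_fst (k : Nat) :
    ∀ (r a b : Nat), r < 256 → b < 256 →
      ((fun s => stepN s)^[k] (r, a, b)).1 =
        (List.range k).foldl (fun t i => if (b >>> i) &&& 1 = 1 then t ^^^ ((xtN^[i] a) &&& 255) else t) r := by
  induction k with
  | zero => intro r a b _ _; rfl
  | succ k ih =>
      intro r a b hr hb
      rw [Function.iterate_succ_apply]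
      have hb255 : b &&& 255 = b := by rw [nat_and_255]; omega
      have hstep : stepN (r, a, b) =
          ((if b &&& 1 = 1 then r ^^^ (a &&& 255) else r), xtN a, b >>> 1) := by
        simp only [stepN, hb255]
        have : r &&& 255 = r := by rw [nat_and_255]; omega
        rw [this]
      rw [hstep]
      have hr' : (if b &&& 1 = 1 then r ^^^ (a &&& 255) else r) < 256 := by
        split
        · exact Nat.xor_lt_two_pow (n := 8) hr (by rw [nat_and_255]; omega)
        · exact hr
      have hb' : b >>> 1 < 256 := by
        have : b >>> 1 = b / 2 := Nat.shiftRight_one b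
        omega
      rw [ih _ _ _ hr' hb']
      rw [List.range_succ_eq_map, List.foldl_cons, List.foldl_map]
      have hfun : (fun (t : Nat) (i : Nat) => if (b >>> 1 >>> i) &&& 1 = 1 then t ^^^ ((xtN^[i] (xtN a)) &&& 255) else t) =
          (fun (t : Nat) (i : Nat) => if (b >>> i.succ) &&& 1 = 1 then t ^^^ ((xtN^[i.succ] a) &&& 255) else t) := by
        funext t i
        rw [← Nat.shiftRight_add, Nat.add_comm, ← Function.iterate_succ_apply]
      rw [hfun]
      congr 1

-- the reduction pass is ⊕-linear
theorem redStep_lin (bit x y : Nat) :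
    redStepN (x ^^^ y) bit = redStepN x bit ^^^ redStepN y bit := by
  unfold redStepN
  have hxy : ((x ^^^ y) >>> bit) &&& 1 = ((x >>> bit) &&& 1) ^^^ ((y >>> bit) &&& 1) := by
    rw [Nat.shiftRight_xor_distrib, Nat.and_xor_distrib_right]
  by_cases hx : (x >>> bit) &&& 1 = 1 <;> by_cases hy : (y >>> bit) &&& 1 = 1
  · have h0 : ((x ^^^ y) >>> bit) &&& 1 ≠ 1 := by rw [hxy, hx, hy]; decide
    rw [if_neg h0, if_pos hx, if_pos hy]
    simp [Nat.xor_comm, Nat.xor_left_comm]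
  · have hy0 : (y >>> bit) &&& 1 = 0 := by rw [nat_and_1] at hy ⊢; omega
    have h1 : ((x ^^^ y) >>> bit) &&& 1 = 1 := by rw [hxy, hx, hy0]; rfl
    rw [if_pos h1, if_pos hx, if_neg hy]
    simp [Nat.xor_assoc, Nat.xor_comm, Nat.xor_left_comm]
  · have hx0 : (x >>> bit) &&& 1 = 0 := by rw [nat_and_1] at hx ⊢; omega
    have h1 : ((x ^^^ y) >>> bit) &&& 1 = 1 := by rw [hxy, hx0, hy]; rfl
    rw [if_pos h1, if_neg hx, if_pos hy, Nat.xor_assoc]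
  · have hx0 : (x >>> bit) &&& 1 = 0 := by rw [nat_and_1] at hx ⊢; omega
    have hy0 : (y >>> bit) &&& 1 = 0 := by rw [nat_and_1] at hy ⊢; omega
    have h0 : ((x ^^^ y) >>> bit) &&& 1 ≠ 1 := by rw [hxy, hx0, hy0]; decide
    rw [if_neg h0, if_neg hx, if_neg hy]

theorem foldl_redStep_lin (l : List Nat) :
    ∀ x y, l.foldl redStepN (x ^^^ y) = l.foldl redStepN x ^^^ l.foldl redStepN y := by
  induction l with
  | nil => intro x y; rfl
  | cons c cs ih =>
      intro x y
      simp only [List.foldl_cons]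
      rw [redStep_lin c x y]
      exact ih _ _

theorem redN_lin (x y : Nat) : redN (x ^^^ y) = redN x ^^^ redN y :=
  foldl_redStep_lin _ x y

theorem redN_zero : redN 0 = 0 := rfl

theorem redN_foldl (c : Nat → Prop) [DecidablePred c] (t : Nat → Nat) (l : List Nat) :
    ∀ acc, redN (l.foldl (fun p i => if c i then p ^^^ t i else p) acc) =
      l.foldl (fun p i => if c i then p ^^^ redN (t i) else p) (redN acc) := by
  induction l with
  | nil => intro acc; rfl
  | cons x xs ih =>
      intro acc
      simp only [List.foldl_cons]
      by_cases h : c x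
      · simp only [h, if_pos]
        rw [ih, redN_lin]
      · simp only [h]
        exact ih acc

-- per-bit agreement: the i-th xtime iterate's byte is the reduction of the i-th shift
set_option maxRecDepth 100000 in
set_option maxHeartbeats 1000000 in
theorem key2 : ∀ (n : Fin 256) (i : Fin 8), (xtN^[i.val] n.val) &&& 255 = redN (n.val <<< i.val) := by
  decide

theorem foldl_byte_congr (n m : Nat) (hn : n < 256) (l : List Nat) (hl : ∀ i ∈ l, i < 8) :
    ∀ r, l.foldl (fun t i => if (m >>> i) &&& 1 = 1 then t ^^^ ((xtN^[i] n) &&& 255) else t) r =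
      l.foldl (fun p i => if (m >>> i) &&& 1 = 1 then p ^^^ redN (n <<< i) else p) r := by
  induction l with
  | nil => intro r; rfl
  | cons x xs ih =>
      intro r
      simp only [List.foldl_cons]
      rw [key2 ⟨n, hn⟩ ⟨x, hl x (by simp)⟩]
      exact ih (fun i hi => hl i (by simp [hi])) _

theorem natA_eq_natB (n m : Nat) (hn : n < 256) (hm : m < 256) :
    natAN n m = redN (mulFoldN n m) := by
  have hA : natAN n m = ((fun s => stepN s)^[8] (0, n, m)).1 := rfl
  rw [hA, stepN_iter_fst 8 0 n m (by omega) hm]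
  rw [mulFoldN, redN_foldl (fun i => (m >>> i) &&& 1 = 1) (fun i => n <<< i) (List.range 8) 0,
    redN_zero]
  exact foldl_byte_congr n m hn (List.range 8) (by intro i hi; simpa using hi) 0

-- ===== VERDICT (by name: the statement is the Claim_ definition above) =====
theorem GF_product_p_spec : Claim_equal_GF_product_p := by
  intro a b _
  unfold Spec_GF_product_p
  rw [A_mod a b, A_cast, B_total]
  have hn : (a % 256).toNat < 256 := by omega
  have hm : (b % 256).toNat < 256 := by omega
  rw [natA_eq_natB _ _ hn hm]
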